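-- pv_equiv track=rewrite | github.com/PawelMr/Advent_of_Code_2024 | day_6/task1_2.py | get_dict_barriers
-- ===== SOURCE A (Python) =====
-- def get_dict_barriers(barriers, axis = 0):
--     """получить из списка координат словарь типа:
--      координата оси: список координат второй оси которые ей соответствуют
--      barriers - список координат
--      axis - ось 0- x 1- y"""
--     dict_barriers = dict()
--     two_axis = 0 if axis else 1
--     for i in barriers:
--         if dict_barriers.get(i[axis]):
--             dict_barriers[i[axis]].append(i[two_axis])
--         else:
--             dict_barriers.update({i[axis]:[i[two_axis]]})
--     return dict_barriers
-- ===== SOURCE B (Python) =====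
-- def get_dict_barriers(barriers, axis=0):
--     """Two-pass grouping: dedup the axis keys in first-occurrence order,
--     then build each group with a comprehension over the whole list."""
--     two_axis = 0 if axis else 1
--     keys = list(dict.fromkeys(p[axis] for p in barriers))
--     return {k: [p[two_axis] for p in barriers if p[axis] == k] for k in keys}
-- ===== Notes on version B (the rewrite author's own statement) =====
-- stated objective: alternative
-- what changed: Replaces the single-pass dict mutation (get, append-or-create) with a two-pass scheme: first an ordered dedup of the axis keys, then one comprehension per key that collects its group from the whole list; no dict is mutated.
import Mathlib
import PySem

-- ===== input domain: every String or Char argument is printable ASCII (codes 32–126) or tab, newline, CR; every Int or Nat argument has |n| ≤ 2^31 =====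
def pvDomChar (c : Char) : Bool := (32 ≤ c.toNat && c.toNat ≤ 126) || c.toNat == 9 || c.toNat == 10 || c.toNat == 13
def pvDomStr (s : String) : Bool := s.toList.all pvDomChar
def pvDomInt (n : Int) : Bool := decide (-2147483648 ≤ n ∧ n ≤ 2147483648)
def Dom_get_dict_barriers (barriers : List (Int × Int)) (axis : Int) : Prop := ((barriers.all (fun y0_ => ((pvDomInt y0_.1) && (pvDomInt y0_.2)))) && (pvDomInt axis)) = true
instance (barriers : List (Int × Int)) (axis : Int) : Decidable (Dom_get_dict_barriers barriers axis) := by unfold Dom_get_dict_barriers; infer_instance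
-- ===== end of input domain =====

-- B groups by a two-pass scheme (ordered key dedup, then one filter pass per key) instead of A's
-- single-pass dict mutation; same return value, alternative decomposition (not claimed faster).


-- ===== PORT A =====
-- Python tuple indexing i[ax] on a pair, exact for ax ∈ {-2,-1,0,1} (Pre_ guarantees this;
-- outside it Python raises IndexError and pyGet? is none, defaulted — nothing is claimed there).
def pvPairGet (p : Int × Int) (ax : Int) : Int :=
  (PySem.List.pyGet? [p.1, p.2] ax).getD 0

-- one iteration of A's loop body: `if dict_barriers.get(k): append else update`
def pvStepA (d : PySem.Dict Int (List Int)) (k v : Int) : PySem.Dict Int (List Int) :=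
  match d.get? k with
  | some l => if l.isEmpty then d.insert k [v] else d.modify k [] (fun t => t ++ [v])
  | none => d.insert k [v]

def get_dict_barriers (barriers : List (Int × Int)) (axis : Int) : List (Int × List Int) :=
  let two_axis : Int := if axis ≠ 0 then 0 else 1
  (barriers.foldl (fun d i => pvStepA d (pvPairGet i axis) (pvPairGet i two_axis))
    PySem.Dict.empty).items

-- ===== PORT B =====
def get_dict_barriers_alt (barriers : List (Int × Int)) (axis : Int) : List (Int × List Int) :=
  let two_axis : Int := if axis ≠ 0 then 0 else 1
  (PySem.List.dedup (barriers.map (fun p => pvPairGet p axis))).map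
    (fun k => (k, (barriers.filter (fun p => pvPairGet p axis == k)).map
                    (fun p => pvPairGet p two_axis)))

-- ===== PRECONDITION & SPEC =====
-- Pre_ excludes exactly the inputs where Python A raises IndexError: a pair indexed with an
-- axis outside {-2,-1,0,1} (with empty barriers no indexing happens, so any axis is fine).
def Pre_get_dict_barriers (barriers : List (Int × Int)) (axis : Int) : Prop :=
  barriers = [] ∨ axis = 0 ∨ axis = 1 ∨ axis = -1 ∨ axis = -2
instance (barriers : List (Int × Int)) (axis : Int) : Decidable (Pre_get_dict_barriers barriers axis) := by unfold Pre_get_dict_barriers; infer_instance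

def pvWitness_get_dict_barriers : (List (Int × Int)) × Int := ([(1, 2), (1, 3), (4, 5)], 0)

def Spec_get_dict_barriers (barriers : List (Int × Int)) (axis : Int) (out : List (Int × List Int)) : Prop := out = get_dict_barriers_alt barriers axis
instance (barriers : List (Int × Int)) (axis : Int) (out : List (Int × List Int)) : Decidable (Spec_get_dict_barriers barriers axis out) := by unfold Spec_get_dict_barriers; infer_instance

-- ===== CLAIM (what is proved, stated in full; the proofs are below) =====
def Claim_equal_get_dict_barriers : Prop := ∀ (barriers : List (Int × Int)) (axis : Int), Dom_get_dict_barriers barriers axis → Pre_get_dict_barriers barriers axis → Spec_get_dict_barriers barriers axis (get_dict_barriers barriers axis)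

-- ===== LEMMAS AND PROOFS =====

-- A's branch collapses: the loop body is always `insert k (current-or-[] ++ [v])`.
theorem pvStepA_eq (d : PySem.Dict Int (List Int)) (k v : Int) :
    pvStepA d k v = d.insert k (d.getD k [] ++ [v]) := by
  unfold pvStepA PySem.Dict.modify
  cases hg : d.get? k with
  | none => rw [PySem.Dict.getD_of_get?_eq_none _ _ hg]; simp
  | some l =>
    rw [PySem.Dict.getD_of_get?_eq_some _ _ hg]
    cases l <;> simp

-- lookup in an association list built as `ks.map (fun k' => (k', f k'))`
theorem pvFindMap (ks : List Int) (f : Int → List Int) (k : Int) :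
    (ks.map (fun k' => (k', f k'))).find? (fun p => p.1 == k)
      = if k ∈ ks then some (k, f k) else none := by
  induction ks with
  | nil => simp
  | cons a ks ih =>
    by_cases hak : a = k
    · subst hak; simp
    · simp [beq_iff_eq, hak, ih, Ne.symm hak]

theorem pvDedupSnoc (l : List Int) (x : Int) :
    PySem.List.dedup (l ++ [x])
      = if x ∈ l then PySem.List.dedup l else PySem.List.dedup l ++ [x] := by
  have h1 : PySem.List.dedup (l ++ [x]) = PySem.Set.add (PySem.List.dedup l) x := by
    simp only [PySem.List.dedup, PySem.Set.ofList, List.foldl_append, List.foldl_cons,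
      List.foldl_nil]
  rw [h1]
  by_cases hx : x ∈ l <;> simp [PySem.Set.add, hx]

-- inserting key k with value (lookup-or-[] ++ [v]) into the grouped dict for keys l
theorem pvInsertG (l : List Int) (f : Int → List Int) (k v : Int)
    (hf : k ∉ l → f k = []) :
    ((PySem.Dict.mk ((PySem.List.dedup l).map (fun k' => (k', f k')))).insert k
        ((if k ∈ l then f k else []) ++ [v])).items
      = (PySem.List.dedup (l ++ [k])).map
          (fun k' => (k', f k' ++ (if k' == k then [v] else []))) := by
  rw [pvDedupSnoc]
  by_cases hk : k ∈ l
  · rw [PySem.Dict.insert, if_pos (by simp [hk])]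
    simp only [if_pos hk, List.map_map]
    apply List.map_congr_left
    intro a _
    by_cases hak : a = k
    · subst hak; simp
    · simp [Function.comp, beq_iff_eq, hak]
  · rw [PySem.Dict.insert, if_neg (by simp [hk])]
    simp only [if_neg hk, List.map_append, List.map_cons, List.map_nil]
    congr 1
    · apply List.map_congr_left
      intro a ha
      have hal : a ∈ l := (PySem.List.mem_dedup l a).mp ha
      have hak : a ≠ k := fun h => hk (h ▸ hal)
      simp [beq_iff_eq, hak]
    · simp [hf hk]

-- the grouped dict's lookup
theorem pvGetDG (l : List Int) (f : Int → List Int) (k : Int) :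
    (PySem.Dict.mk ((PySem.List.dedup l).map (fun k' => (k', f k')))).getD k []
      = if k ∈ l then f k else [] := by
  have hget : (PySem.Dict.mk ((PySem.List.dedup l).map (fun k' => (k', f k')))).get? k
      = if k ∈ l then some (f k) else none := by
    show (((PySem.List.dedup l).map (fun k' => (k', f k'))).find?
        (fun p => p.1 == k)).map (·.2) = _
    rw [pvFindMap]
    by_cases hk : k ∈ l
    · simp [hk]
    · simp [hk]
  rw [PySem.Dict.getD_eq_get?_getD, hget]
  by_cases hk : k ∈ l <;> simp [hk]

-- main invariant: A's fold over bs produces exactly B's grouped association list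
theorem pvFoldItems {α : Type} (key val : α → Int) (bs : List α) :
    (bs.foldl (fun d i => pvStepA d (key i) (val i)) PySem.Dict.empty).items
      = (PySem.List.dedup (bs.map key)).map
          (fun k => (k, (bs.filter (fun p => key p == k)).map val)) := by
  induction bs using List.reverseRecOn with
  | nil => rfl
  | append_singleton bs b ih =>
    rw [List.foldl_append, List.foldl_cons, List.foldl_nil, pvStepA_eq]
    set d := bs.foldl (fun d i => pvStepA d (key i) (val i)) PySem.Dict.empty with hd
    have hditems : d = PySem.Dict.mk ((PySem.List.dedup (bs.map key)).map
        (fun k => (k, (bs.filter (fun p => key p == k)).map val))) :=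
      congrArg PySem.Dict.mk ih
    have hf : key b ∉ bs.map key →
        (bs.filter (fun p => key p == key b)).map val = [] := by
      intro hnm
      have : bs.filter (fun p => key p == key b) = [] := by
        apply List.filter_eq_nil_iff.mpr
        intro p hp hpk
        exact hnm (List.mem_map.mpr ⟨p, hp, by simpa using hpk⟩)
      simp [this]
    rw [hditems, pvGetDG, pvInsertG _ _ _ _ hf]
    rw [List.map_append]
    apply List.map_congr_left
    intro a _
    simp only [List.filter_append, List.map_append, List.filter_cons, List.filter_nil]
    by_cases hab : key b = a
    · simp [hab]
    · simp [hab, beq_iff_eq, Ne.symm hab]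

-- ===== VERDICT (by name: the statement is the Claim_ definition above) =====
theorem get_dict_barriers_spec : Claim_equal_get_dict_barriers := by
  intro barriers axis _ _
  unfold Spec_get_dict_barriers get_dict_barriers get_dict_barriers_alt
  exact pvFoldItems (fun p => pvPairGet p axis)
    (fun p => pvPairGet p (if axis ≠ 0 then 0 else 1)) barriers
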